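-- pv_equiv track=rewrite | github.com/shachardon/user_interactions | auxiliary/preprocess_nof.py | truncate_history_starting_with_human
-- ===== SOURCE A (Python) =====
-- def truncate_history_starting_with_human(history, max_messages=5):
--     if not history:
--         return None
--
--     truncated = history[-max_messages:]
--
--     while truncated and truncated[0]["from"] != "human":
--         truncated = truncated[1:]
--
--     if not truncated:
--         return None
--
--     normalized = [truncated[0]]
--     for m in truncated[1:]:
--         if m["from"] != normalized[-1]["from"]:
--             normalized.append(m)
--
--     if not normalized or normalized[0]["from"] != "human":
--         return None
--
--     return normalized
-- ===== SOURCE B (Python) =====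
-- def truncate_history_starting_with_human(history, max_messages=5):
--     normalized = []
--     for m in history[-max_messages:]:
--         if not normalized:
--             if m["from"] == "human":
--                 normalized.append(m)
--         elif m["from"] != normalized[-1]["from"]:
--             normalized.append(m)
--     return normalized or None
-- ===== Notes on version B (the rewrite author's own statement) =====
-- stated objective: simpler
-- what changed: Replaces A's three phases (skip-while slicing off the non-human prefix, a separate dedup loop seeded with truncated[0], and a final dead human-guard) by one fused pass over history[-max_messages:] that appends a message only when the accumulator is empty and the message is human, or when its 'from' differs from the last kept one.
import Mathlib
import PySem

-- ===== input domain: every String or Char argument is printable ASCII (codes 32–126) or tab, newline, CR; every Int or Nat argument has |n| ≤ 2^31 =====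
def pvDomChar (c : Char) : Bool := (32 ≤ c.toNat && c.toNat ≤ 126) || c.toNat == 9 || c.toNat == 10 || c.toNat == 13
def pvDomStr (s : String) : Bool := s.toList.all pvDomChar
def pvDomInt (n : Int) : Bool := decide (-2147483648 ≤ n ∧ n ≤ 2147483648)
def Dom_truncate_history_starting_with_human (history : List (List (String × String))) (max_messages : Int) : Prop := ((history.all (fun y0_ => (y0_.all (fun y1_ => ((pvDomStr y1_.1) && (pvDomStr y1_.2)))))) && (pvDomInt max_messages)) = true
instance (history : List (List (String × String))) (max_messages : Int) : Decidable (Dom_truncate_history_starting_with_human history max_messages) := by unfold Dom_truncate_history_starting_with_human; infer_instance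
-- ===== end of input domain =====

-- B fuses A's skip-prefix loop, dedup loop and dead final human-guard into one pass (objective: simpler).


-- ===== PORT A =====
-- m["from"] : first-match association-list lookup (Python dicts have unique keys);
-- under Pre_ the key is present, so the Option never matters for admitted inputs.
def pvFrom (m : List (String × String)) : Option String := m.lookup "from"

-- A's `while truncated and truncated[0]["from"] != "human": truncated = truncated[1:]`
def pvSkipA (l : List (List (String × String))) : List (List (String × String)) :=
  match l with
  | [] => []
  | m :: rest => if pvFrom m ≠ some "human" then pvSkipA rest else m :: rest

-- A's dedup loop body: append m iff m["from"] != normalized[-1]["from"]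
def pvDedupStepA (acc : List (List (String × String))) (m : List (String × String)) : List (List (String × String)) :=
  if pvFrom m ≠ pvFrom (acc.getLast?.getD []) then acc ++ [m] else acc

def truncate_history_starting_with_human (history : List (List (String × String))) (max_messages : Int) : Option (List (List (String × String))) :=
  if history = [] then none
  else
    let truncated := PySem.List.slice history (some (-max_messages)) none
    let truncated := pvSkipA truncated
    if truncated = [] then none
    else
      match truncated with
      | [] => none
      | h :: t =>
        let normalized := t.foldl pvDedupStepA [h]
        if normalized = [] ∨ pvFrom (normalized.headD []) ≠ some "human" then none
        else some normalized

-- ===== PORT B =====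
-- B's single loop body: empty accumulator → keep only a human message; else dedup on "from"
def pvStepB (acc : List (List (String × String))) (m : List (String × String)) : List (List (String × String)) :=
  match acc with
  | [] => if pvFrom m = some "human" then [m] else []
  | _ => if pvFrom m ≠ pvFrom (acc.getLast?.getD []) then acc ++ [m] else acc

def truncate_history_starting_with_human_alt (history : List (List (String × String))) (max_messages : Int) : Option (List (List (String × String))) :=
  let normalized := (PySem.List.slice history (some (-max_messages)) none).foldl pvStepB []
  if normalized = [] then none else some normalized

-- ===== PRECONDITION & SPEC =====
-- Pre_ excludes exactly the inputs where the Python A raises KeyError: some message in the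
-- examined window history[-max_messages:] lacks the key "from" (B raises there too).
def Pre_truncate_history_starting_with_human (history : List (List (String × String))) (max_messages : Int) : Prop :=
  ∀ m ∈ PySem.List.slice history (some (-max_messages)) none, (m.lookup "from").isSome
instance (history : List (List (String × String))) (max_messages : Int) : Decidable (Pre_truncate_history_starting_with_human history max_messages) := by unfold Pre_truncate_history_starting_with_human; infer_instance

def pvWitness_truncate_history_starting_with_human : (List (List (String × String))) × Int :=
  ([[("from", "gpt"), ("value", "hi")], [("from", "human"), ("value", "hey")], [("from", "gpt"), ("value", "yo")]], 5)

def Spec_truncate_history_starting_with_human (history : List (List (String × String))) (max_messages : Int) (out : Option (List (List (String × String)))) : Prop := out = truncate_history_starting_with_human_alt history max_messages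
instance (history : List (List (String × String))) (max_messages : Int) (out : Option (List (List (String × String)))) : Decidable (Spec_truncate_history_starting_with_human history max_messages out) := by unfold Spec_truncate_history_starting_with_human; infer_instance

-- ===== CLAIM (what is proved, stated in full; the proofs are below) =====
def Claim_equal_truncate_history_starting_with_human : Prop := ∀ (history : List (List (String × String))) (max_messages : Int), Dom_truncate_history_starting_with_human history max_messages → Pre_truncate_history_starting_with_human history max_messages → Spec_truncate_history_starting_with_human history max_messages (truncate_history_starting_with_human history max_messages)

-- ===== LEMMAS AND PROOFS =====

-- A's dedup step keeps the accumulator nonempty and keeps its head.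
theorem pvDedupStepA_ne_nil (acc : List (List (String × String))) (m : List (String × String)) (h : acc ≠ []) : pvDedupStepA acc m ≠ [] := by
  unfold pvDedupStepA; split_ifs <;> simp [h]

theorem pvDedupStepA_head (acc : List (List (String × String))) (m : List (String × String)) (h : acc ≠ []) : (pvDedupStepA acc m).head? = acc.head? := by
  unfold pvDedupStepA; split_ifs with hc
  · cases acc with
    | nil => exact absurd rfl h
    | cons a l => simp
  · rfl

theorem foldl_dedupA_ne_nil (t : List (List (String × String))) (acc : List (List (String × String))) (h : acc ≠ []) : t.foldl pvDedupStepA acc ≠ [] := by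
  induction t generalizing acc with
  | nil => exact h
  | cons m t ih => exact ih _ (pvDedupStepA_ne_nil acc m h)

theorem foldl_dedupA_head (t : List (List (String × String))) (acc : List (List (String × String))) (h : acc ≠ []) : (t.foldl pvDedupStepA acc).head? = acc.head? := by
  induction t generalizing acc with
  | nil => rfl
  | cons m t ih =>
      simp only [List.foldl_cons]
      rw [ih _ (pvDedupStepA_ne_nil acc m h), pvDedupStepA_head acc m h]

-- On a nonempty accumulator B's step is exactly A's dedup step.
theorem pvStepB_eq_dedupA (acc : List (List (String × String))) (m : List (String × String)) (h : acc ≠ []) : pvStepB acc m = pvDedupStepA acc m := by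
  cases acc with
  | nil => exact absurd rfl h
  | cons a l => rfl

theorem foldl_stepB_eq_dedupA (t : List (List (String × String))) (acc : List (List (String × String))) (h : acc ≠ []) : t.foldl pvStepB acc = t.foldl pvDedupStepA acc := by
  induction t generalizing acc with
  | nil => rfl
  | cons m t ih =>
      simp only [List.foldl_cons]
      rw [pvStepB_eq_dedupA acc m h, ih _ (pvDedupStepA_ne_nil acc m h)]

-- The head of A's skipped list, when nonempty, is a human message.
theorem pvSkipA_head_human (l : List (List (String × String))) : ∀ h t, pvSkipA l = h :: t → pvFrom h = some "human" := by
  induction l with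
  | nil => intro h t hc; simp [pvSkipA] at hc
  | cons m rest ih =>
      intro h t hc
      unfold pvSkipA at hc
      split_ifs at hc with hm
      · exact ih h t hc
      · cases hc; simpa using hm

-- B's fused fold from [] computes: skip the non-human prefix, then run A's dedup loop.
theorem foldl_stepB_nil (l : List (List (String × String))) :
    l.foldl pvStepB [] = (match pvSkipA l with | [] => [] | h :: t => t.foldl pvDedupStepA [h]) := by
  induction l with
  | nil => rfl
  | cons m rest ih =>
      by_cases hm : pvFrom m = some "human"
      · have hskip : pvSkipA (m :: rest) = m :: rest := by
          rw [pvSkipA.eq_def]; simp [hm]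
        rw [hskip]
        simp only [List.foldl_cons]
        have : pvStepB [] m = [m] := by simp [pvStepB, hm]
        rw [this, foldl_stepB_eq_dedupA rest [m] (by simp)]
      · have hskip : pvSkipA (m :: rest) = pvSkipA rest := by
          rw [pvSkipA.eq_def]; simp [hm]
        rw [hskip]
        simp only [List.foldl_cons]
        have : pvStepB [] m = [] := by simp [pvStepB, hm]
        rw [this, ih]

-- ===== VERDICT (by name: the statement is the Claim_ definition above) =====
theorem truncate_history_starting_with_human_spec : Claim_equal_truncate_history_starting_with_human := by
  intro history max_messages _ _
  unfold Spec_truncate_history_starting_with_human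
  unfold truncate_history_starting_with_human truncate_history_starting_with_human_alt
  by_cases hh : history = []
  · subst hh
    simp [PySem.List.slice]
  · simp only [if_neg hh]
    rw [foldl_stepB_nil]
    cases hs : pvSkipA (PySem.List.slice history (some (-max_messages)) none) with
    | nil => simp
    | cons h t =>
        have hhead : pvFrom h = some "human" := pvSkipA_head_human _ h t hs
        have hne : t.foldl pvDedupStepA [h] ≠ [] := foldl_dedupA_ne_nil t [h] (by simp)
        have hhd : (t.foldl pvDedupStepA [h]).head? = some h := by
          rw [foldl_dedupA_head t [h] (by simp)]; rfl
        simp [hne, hhd, hhead]
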